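-- pv_equiv track=rewrite | github.com/or-m-or/KT-AIVLE-School-5th_Codingmasters | example/round2/Beginner/Q8697_유사소수분할/A8697.py | solution
-- ===== SOURCE A (Python) =====
-- import math
--
-- def is_prime(num):
--     ''' 소수 판별 함수 '''
--     if num < 2:
--         return False
--     for i in range(2, int(math.sqrt(num)+1)):
--         if num % i == 0:
--             return False
--     return True
--
-- def is_pseudoprime(num):
--     ''' 유사소수 판별 함수 '''
--     if num < 4:  # 최소한의 유사소수는 2*3=6이므로, 4미만은 고려하지 않습니다.
--         return False
--
--     prime_factors = []  # 소수인 약수를 저장할 리스트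
--
--     # 1과 자기 자신을 제외한 범위에서 소수인 약수를 찾습니다.
--     for i in range(2, int(math.sqrt(num) + 1)):
--         if num % i == 0 and is_prime(i):
--             prime_factors.append(i)
--             if num // i != i and is_prime(num // i):  # 제곱수가 아닌 경우, 몫도 소수인지 확인
--                 prime_factors.append(num // i)
--
--     # 유사소수의 조건을 만족하는지 확인
--     if len(prime_factors) == 2 and (prime_factors[0] * prime_factors[1] == num):
--         return True
--     else:
--         return False
--
-- def solution(N):
--     pseudoprimes = [i for i in range(2, N) if is_pseudoprime(i)]
--     for i in range(len(pseudoprimes)):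
--         for j in range(i+1, len(pseudoprimes)):
--             for k in range(j+1, len(pseudoprimes)):
--                 l = N - (pseudoprimes[i] + pseudoprimes[j] + pseudoprimes[k])
--                 # 여기서 l > 0 조건 뿐만 아니라, l이 유사 소수인지도 확인합니다.
--                 if l > 0 and (is_pseudoprime(l) or l in pseudoprimes):
--                     return True
--     return False
-- ===== SOURCE B (Python) =====
-- import math
--
-- def is_prime(num):
--     if num < 2:
--         return False
--     for i in range(2, int(math.sqrt(num) + 1)):
--         if num % i == 0:
--             return False
--     return True
--
-- def is_pseudoprime(num):
--     if num < 4: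
--         return False
--     prime_factors = []
--     for i in range(2, int(math.sqrt(num) + 1)):
--         if num % i == 0 and is_prime(i):
--             prime_factors.append(i)
--             if num // i != i and is_prime(num // i):
--                 prime_factors.append(num // i)
--     return len(prime_factors) == 2 and prime_factors[0] * prime_factors[1] == num
--
-- def solution(N):
--     # Pseudoprimes below N, ascending (the fourth summand is checked by membership in P's range via the pair-sum set).
--     P = [i for i in range(2, N) if is_pseudoprime(i)]
--     # sums = all pair sums P[a]+P[b] with a < b < j while the third element is P[j]:
--     # N is a valid split iff N - P[j] - l is such a pair sum for some pseudoprime l.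
--     sums = set()
--     for j in range(2, len(P)):
--         for i in range(j - 1):
--             sums.add(P[i] + P[j - 1])
--         c = P[j]
--         for l in P:
--             if (N - c - l) in sums:
--                 return True
--     return False
-- ===== Notes on version B (the rewrite author's own statement) =====
-- stated objective: alternative
-- what changed: The cubic triple-index scan that re-runs the trial-division pseudoprime test on every candidate remainder is replaced by an incrementally grown hash set of pair sums: N splits iff N - P[j] - l is a pair sum of earlier pseudoprimes, so the search is a quadratic set-membership sweep with no primality test inside the loops.
import Mathlib
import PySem

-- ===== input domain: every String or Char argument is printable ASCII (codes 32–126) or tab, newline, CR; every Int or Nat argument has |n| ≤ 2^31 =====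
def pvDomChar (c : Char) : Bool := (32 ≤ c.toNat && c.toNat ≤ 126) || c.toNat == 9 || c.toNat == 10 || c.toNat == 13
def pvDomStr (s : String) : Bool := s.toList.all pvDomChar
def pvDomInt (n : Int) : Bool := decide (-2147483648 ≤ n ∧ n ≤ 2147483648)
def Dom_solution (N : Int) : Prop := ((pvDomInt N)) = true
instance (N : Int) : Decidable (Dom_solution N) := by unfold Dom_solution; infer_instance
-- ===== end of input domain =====

-- B replaces A's cubic triple-index scan (with a trial-division pseudoprime test inside the
-- innermost loop) by an incrementally grown set of pair sums of earlier pseudoprimes,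
-- checked by membership against each third element and fourth summand.

-- ===== PORT A =====
-- 'int(math.sqrt(num) + 1)' is ported as 'Nat.sqrt num.toNat + 1': exact for 0 ≤ num ≤ 2^31
-- (the float sqrt of such num rounds to a double within 2^-20 of the true root, so the
-- truncation agrees with the integer root there; num is always below N ≤ 2^31 here).
def isPrime (num : Int) : Bool :=
  if num < 2 then false
  else (PySem.List.pyRange 2 ((Nat.sqrt num.toNat : Int) + 1) 1).all
    (fun i => !(PySem.Int.mod num i == 0))

def isPseudoprime (num : Int) : Bool :=
  if num < 4 then false
  else
    let primeFactors : List Int :=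
      (PySem.List.pyRange 2 ((Nat.sqrt num.toNat : Int) + 1) 1).foldl
        (fun acc i =>
          if PySem.Int.mod num i == 0 && isPrime i then
            let acc := acc ++ [i]
            if !(PySem.Int.floordiv num i == i) && isPrime (PySem.Int.floordiv num i) then
              acc ++ [PySem.Int.floordiv num i]
            else acc
          else acc) []
    primeFactors.length == 2 &&
      PySem.List.pyGetD primeFactors 0 0 * PySem.List.pyGetD primeFactors 1 0 == num

def solution (N : Int) : Bool :=
  let pseudoprimes := (PySem.List.pyRange 2 N 1).filter isPseudoprime
  (PySem.List.pyRange 0 (pseudoprimes.length : Int) 1).any fun i =>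
    (PySem.List.pyRange (i + 1) (pseudoprimes.length : Int) 1).any fun j =>
      (PySem.List.pyRange (j + 1) (pseudoprimes.length : Int) 1).any fun k =>
        let l := N - (PySem.List.pyGetD pseudoprimes i 0 + PySem.List.pyGetD pseudoprimes j 0
                        + PySem.List.pyGetD pseudoprimes k 0)
        decide (l > 0) && (isPseudoprime l || pseudoprimes.contains l)

-- ===== PORT B =====
-- Source B's helpers is_prime / is_pseudoprime are textually the very same functions as A's;
-- the port reuses the definitions above instead of duplicating them.
def solutionAltGo (N : Int) (P : List Int) (sums : PySem.Set Int) (js : List Int) : Bool :=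
  match js with
  | [] => false
  | j :: rest =>
    let sums :=
      (PySem.List.pyRange 0 (j - 1) 1).foldl
        (fun s i => PySem.Set.add s (PySem.List.pyGetD P i 0 + PySem.List.pyGetD P (j - 1) 0))
        sums
    let c := PySem.List.pyGetD P j 0
    if P.any (fun l => PySem.Set.contains sums (N - c - l)) then true
    else solutionAltGo N P sums rest

def solution_alt (N : Int) : Bool :=
  let P := (PySem.List.pyRange 2 N 1).filter isPseudoprime
  solutionAltGo N P PySem.Set.empty (PySem.List.pyRange 2 (P.length : Int) 1)

-- ===== PRECONDITION & SPEC =====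
def Spec_solution (N : Int) (out : Bool) : Prop := out = solution_alt N
instance (N : Int) (out : Bool) : Decidable (Spec_solution N out) := by unfold Spec_solution; infer_instance

-- ===== CLAIM (what is proved, stated in full; the proofs are below) =====
def Claim_equal_solution : Prop := ∀ (N : Int), Dom_solution N → Spec_solution N (solution N)

-- ===== LEMMAS AND PROOFS =====

theorem four_le_of_isPseudoprime {l : Int} (h : isPseudoprime l = true) : 4 ≤ l := by
  unfold isPseudoprime at h
  by_contra hc
  simp [show l < 4 by omega] at h

-- membership in the shared pseudoprime list
theorem mem_pseudolist {N x : Int} :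
    x ∈ (PySem.List.pyRange 2 N 1).filter isPseudoprime ↔
      (2 ≤ x ∧ x < N) ∧ isPseudoprime x = true := by
  simp [List.mem_filter, PySem.List.mem_pyRange_one]

-- pyGetD with an in-range nonnegative Int index is getD at its toNat
theorem pyGetD_eq_getD (P : List Int) (i : Int) (h0 : 0 ≤ i) (h : i < P.length) :
    PySem.List.pyGetD P i 0 = P.getD i.toNat 0 := by
  rw [PySem.List.pyGetD_eq_getElem P 0 h0 (by simpa using h),
      List.getD_eq_getElem _ _ (by omega)]

-- A's triple loop, as an existential over Nat indices (with the redundant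
-- 'l > 0 and (… or l in pseudoprimes)' test reduced to the pseudoprime test alone)
theorem solution_iff (N : Int) :
    solution N = true ↔
      ∃ a b c : Nat, a < b ∧ b < c ∧
        c < ((PySem.List.pyRange 2 N 1).filter isPseudoprime).length ∧
        isPseudoprime (N -
          (((PySem.List.pyRange 2 N 1).filter isPseudoprime).getD a 0 +
           ((PySem.List.pyRange 2 N 1).filter isPseudoprime).getD b 0 +
           ((PySem.List.pyRange 2 N 1).filter isPseudoprime).getD c 0)) = true := by
  unfold solution
  simp only [List.any_eq_true, PySem.List.mem_pyRange_one, Bool.and_eq_true, Bool.or_eq_true,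
    decide_eq_true_eq, List.contains_eq_mem, List.mem_filter]
  constructor
  · rintro ⟨i, ⟨hi0, hi⟩, j, ⟨hj0, hj⟩, k, ⟨hk0, hk⟩, hcond⟩
    rw [pyGetD_eq_getD _ _ hi0 (by exact_mod_cast hi),
        pyGetD_eq_getD _ _ (by omega) (by exact_mod_cast hj),
        pyGetD_eq_getD _ _ (by omega) (by exact_mod_cast hk)] at hcond
    refine ⟨i.toNat, j.toNat, k.toNat, by omega, by omega, by omega, ?_⟩
    rcases hcond.2 with h | h
    · exact h
    · exact h.2
  · rintro ⟨a, b, c, hab, hbc, hc, hps⟩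
    refine ⟨(a : Int), ⟨by omega, by exact_mod_cast (by omega : a < _)⟩,
            (b : Int), ⟨by omega, by exact_mod_cast (by omega : b < _)⟩,
            (c : Int), ⟨by omega, by exact_mod_cast hc⟩, ?_⟩
    rw [pyGetD_eq_getD _ _ (by omega) (by exact_mod_cast (by omega : a < _)),
        pyGetD_eq_getD _ _ (by omega) (by exact_mod_cast (by omega : b < _)),
        pyGetD_eq_getD _ _ (by omega) (by exact_mod_cast hc)]
    simp only [Int.toNat_natCast]
    have h4 := four_le_of_isPseudoprime hps
    exact ⟨by omega, Or.inl hps⟩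

-- the B loop: with 'sums' holding exactly the pair sums of elements below j₀ - 1,
-- solutionAltGo over range(j₀, len(P)) finds a split with third index ≥ j₀
theorem go_iff (N : Int) (P : List Int) :
    ∀ (n : Nat) (j₀ : Int) (sums : PySem.Set Int),
      2 ≤ j₀ →
      n = ((P.length : Int) - j₀).toNat →
      (∀ x, x ∈ sums ↔ ∃ a b : Nat, a < b ∧ (b : Int) < j₀ - 1 ∧ x = P.getD a 0 + P.getD b 0) →
      (solutionAltGo N P sums (PySem.List.pyRange j₀ (P.length : Int) 1) = true ↔
        ∃ c : Nat, j₀ ≤ (c : Int) ∧ c < P.length ∧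
          ∃ l ∈ P, ∃ a b : Nat, a < b ∧ b < c ∧
            N - P.getD c 0 - l = P.getD a 0 + P.getD b 0) := by
  intro n
  induction n with
  | zero =>
    intro j₀ sums hj2 hn hinv
    have hge : (P.length : Int) ≤ j₀ := by omega
    rw [PySem.List.pyRange_one_eq_nil hge]
    simp only [solutionAltGo]
    constructor
    · intro h; cases h
    · rintro ⟨c, hc1, hc2, -⟩; omega
  | succ n ih =>
    intro j₀ sums hj2 hn hinv
    have hlt : j₀ < (P.length : Int) := by omega
    rw [PySem.List.pyRange_one_cons hlt]
    simp only [solutionAltGo]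
    have hinv' : ∀ x, x ∈ (PySem.List.pyRange 0 (j₀ - 1) 1).foldl
        (fun s i => PySem.Set.add s (PySem.List.pyGetD P i 0 + PySem.List.pyGetD P (j₀ - 1) 0)) sums ↔
        ∃ a b : Nat, a < b ∧ (b : Int) < j₀ ∧ x = P.getD a 0 + P.getD b 0 := by
      intro x
      rw [PySem.Set.mem_foldl_add]
      constructor
      · rintro (hx | ⟨i, hi, rfl⟩)
        · obtain ⟨a, b, hab, hb, hx⟩ := (hinv _).mp hx
          exact ⟨a, b, hab, by omega, hx⟩
        · rw [PySem.List.mem_pyRange_one] at hi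
          refine ⟨i.toNat, (j₀ - 1).toNat, by omega, by omega, ?_⟩
          rw [pyGetD_eq_getD P i hi.1 (by omega), pyGetD_eq_getD P (j₀ - 1) (by omega) (by omega)]
      · rintro ⟨a, b, hab, hb, rfl⟩
        by_cases hbj : (b : Int) < j₀ - 1
        · exact Or.inl ((hinv _).mpr ⟨a, b, hab, hbj, rfl⟩)
        · have hbeq : (b : Int) = j₀ - 1 := by omega
          refine Or.inr ⟨(a : Int), by rw [PySem.List.mem_pyRange_one]; omega, ?_⟩
          rw [pyGetD_eq_getD P a (by omega) (by omega), pyGetD_eq_getD P (j₀ - 1) (by omega) (by omega)]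
          congr 2; omega
      -- the two indexed reads stay in range: a < b ≤ j₀ - 1 < len P
    by_cases hany : P.any (fun l => PySem.Set.contains
        ((PySem.List.pyRange 0 (j₀ - 1) 1).foldl
          (fun s i => PySem.Set.add s (PySem.List.pyGetD P i 0 + PySem.List.pyGetD P (j₀ - 1) 0)) sums)
        (N - PySem.List.pyGetD P j₀ 0 - l)) = true
    · rw [hany]
      simp only [if_true, true_iff]
      rw [List.any_eq_true] at hany
      obtain ⟨l, hl, hcont⟩ := hany
      rw [PySem.Set.contains_iff] at hcont
      obtain ⟨a, b, hab, hb, heq⟩ := (hinv' _).mp hcont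
      rw [pyGetD_eq_getD P j₀ (by omega) hlt] at heq
      exact ⟨j₀.toNat, by omega, by omega, l, hl, a, b, hab, by omega, heq⟩
    · rw [Bool.not_eq_true] at hany
      rw [hany]
      simp only [Bool.false_eq_true, if_false]
      rw [ih (j₀ + 1) _ (by omega) (by omega) (by intro x; rw [hinv' x]; constructor <;>
            (rintro ⟨a, b, hab, hb, hx⟩; exact ⟨a, b, hab, by omega, hx⟩))]
      constructor
      · rintro ⟨c, hc1, hc2, l, hl, a, b, hab, hbc, heq⟩
        exact ⟨c, by omega, hc2, l, hl, a, b, hab, hbc, heq⟩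
      · rintro ⟨c, hc1, hc2, l, hl, a, b, hab, hbc, heq⟩
        by_cases hcj : j₀ + 1 ≤ (c : Int)
        · exact ⟨c, hcj, hc2, l, hl, a, b, hab, hbc, heq⟩
        · exfalso
          have hceq : (c : Int) = j₀ := by omega
          rw [Bool.eq_false_iff, Ne, List.any_eq_true] at hany
          apply hany
          refine ⟨l, hl, ?_⟩
          rw [PySem.Set.contains_iff]
          refine (hinv' _).mpr ⟨a, b, hab, by omega, ?_⟩
          rw [pyGetD_eq_getD P j₀ (by omega) hlt]
          rw [show j₀.toNat = c by omega]
          exact heq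

-- B's loop, as the same existential with the fourth summand drawn from the list
theorem solution_alt_iff (N : Int) :
    solution_alt N = true ↔
      ∃ a b c : Nat, a < b ∧ b < c ∧
        c < ((PySem.List.pyRange 2 N 1).filter isPseudoprime).length ∧
        ∃ l ∈ (PySem.List.pyRange 2 N 1).filter isPseudoprime,
          ((PySem.List.pyRange 2 N 1).filter isPseudoprime).getD a 0 +
            ((PySem.List.pyRange 2 N 1).filter isPseudoprime).getD b 0 +
            ((PySem.List.pyRange 2 N 1).filter isPseudoprime).getD c 0 + l = N := by
  unfold solution_alt
  rw [go_iff N _ ((((PySem.List.pyRange 2 N 1).filter isPseudoprime).length : Int) - 2).toNat 2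
        PySem.Set.empty (by omega) rfl (by
          intro x
          simp only [PySem.Set.empty, List.not_mem_nil, false_iff]
          rintro ⟨a, b, hab, hb, -⟩
          omega)]
  constructor
  · rintro ⟨c, -, hc, l, hl, a, b, hab, hbc, heq⟩
    exact ⟨a, b, c, hab, hbc, hc, l, hl, by omega⟩
  · rintro ⟨a, b, c, hab, hbc, hc, l, hl, heq⟩
    exact ⟨c, by omega, hc, l, hl, a, b, hab, hbc, by omega⟩

-- ===== VERDICT (by name: the statement is the Claim_ definition above) =====
theorem solution_spec : Claim_equal_solution := by
  intro N _
  unfold Spec_solution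
  rw [Bool.eq_iff_iff, solution_iff, solution_alt_iff]
  have hiff : ∀ x : Int, x ∈ (PySem.List.pyRange 2 N 1).filter isPseudoprime ↔
      (2 ≤ x ∧ x < N) ∧ isPseudoprime x = true := fun x => mem_pseudolist
  have hmem : ∀ i, i < ((PySem.List.pyRange 2 N 1).filter isPseudoprime).length →
      (2 ≤ ((PySem.List.pyRange 2 N 1).filter isPseudoprime).getD i 0 ∧
        ((PySem.List.pyRange 2 N 1).filter isPseudoprime).getD i 0 < N) ∧
      isPseudoprime (((PySem.List.pyRange 2 N 1).filter isPseudoprime).getD i 0) = true := by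
    intro i h
    rw [List.getD_eq_getElem _ _ h]
    exact mem_pseudolist.mp (List.getElem_mem h)
  generalize (PySem.List.pyRange 2 N 1).filter isPseudoprime = P at hiff hmem ⊢
  constructor
  · rintro ⟨a, b, c, hab, hbc, hc, hps⟩
    have ha := hmem a (by omega); have hb := hmem b (by omega); have hcc := hmem c hc
    have h4a := four_le_of_isPseudoprime ha.2
    have h4b := four_le_of_isPseudoprime hb.2
    have h4c := four_le_of_isPseudoprime hcc.2
    have h4l := four_le_of_isPseudoprime hps
    refine ⟨a, b, c, hab, hbc, hc, N - (P.getD a 0 + P.getD b 0 + P.getD c 0), ?_, by ring⟩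
    rw [hiff]
    exact ⟨⟨by omega, by omega⟩, hps⟩
  · rintro ⟨a, b, c, hab, hbc, hc, l, hl, hsum⟩
    refine ⟨a, b, c, hab, hbc, hc, ?_⟩
    have hl' : N - (P.getD a 0 + P.getD b 0 + P.getD c 0) = l := by omega
    rw [hl']
    exact ((hiff l).mp hl).2
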